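-- pv_equiv track=rewrite | github.com/typegg-io/eggert-bot | src/commands/summary/longestaverage.py | get_longest_average
-- ===== SOURCE A (Python) =====
-- def get_longest_average(values, threshold):
--     """Find the longest contiguous subarray whose average is at least threshold, using prefix sums and a monotonic stack."""
--     adjusted = [v - threshold for v in values]
--
--     prefix = [0]
--     for val in adjusted:
--         prefix.append(prefix[-1] + val)
--
--     stack = []
--     for i, val in enumerate(prefix):
--         if not stack or val < prefix[stack[-1]]:
--             stack.append(i)
--
--     max_len = 0
--     best_start = None
--     best_end = None
--
--     for j in reversed(range(len(prefix))):
--         while stack and prefix[j] >= prefix[stack[-1]]: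
--             i = stack.pop()
--             length = j - i
--
--             if length > max_len:
--                 max_len = length
--                 best_start = i
--                 best_end = j - 1
--
--     if max_len == 0:
--         return None
--
--     return best_start, best_end, max_len
-- ===== SOURCE B (Python) =====
-- def get_longest_average(values, threshold):
--     """Longest contiguous subarray with average >= threshold, by a direct
--     scan over prefix sums: for each end j (descending), take the first
--     start i with prefix[j] >= prefix[i]."""
--     prefix = [0]
--     s = 0
--     for v in values:
--         s = s + (v - threshold)
--         prefix.append(s)
--
--     max_len = 0
--     best_start = None
--     best_end = None
--
--     for j in range(len(prefix) - 1, -1, -1):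
--         for i in range(j + 1):
--             if prefix[j] >= prefix[i]:
--                 if j - i > max_len:
--                     max_len = j - i
--                     best_start = i
--                     best_end = j - 1
--                 break
--
--     if max_len == 0:
--         return None
--
--     return best_start, best_end, max_len
-- ===== Notes on version B (the rewrite author's own statement) =====
-- stated objective: simpler
-- what changed: Replaces the monotonic-stack machinery (stack build pass + pop loop) with a direct scan: for each end index j, taken in descending order, find the first start i with prefix[j] >= prefix[i] and keep it only if strictly longer; prefix sums are built by carrying the running sum instead of appending to prefix[-1].
import Mathlib
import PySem

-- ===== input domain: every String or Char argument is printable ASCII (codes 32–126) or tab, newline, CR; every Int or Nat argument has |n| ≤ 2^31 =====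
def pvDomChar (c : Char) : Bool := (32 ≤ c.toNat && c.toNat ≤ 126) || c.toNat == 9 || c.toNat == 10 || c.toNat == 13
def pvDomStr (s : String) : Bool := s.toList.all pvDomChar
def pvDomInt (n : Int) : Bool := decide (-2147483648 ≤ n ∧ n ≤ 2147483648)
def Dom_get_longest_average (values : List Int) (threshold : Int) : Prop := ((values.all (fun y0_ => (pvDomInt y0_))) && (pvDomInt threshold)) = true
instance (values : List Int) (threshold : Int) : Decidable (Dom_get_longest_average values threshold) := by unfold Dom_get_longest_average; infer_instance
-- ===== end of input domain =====

-- B replaces A's monotonic-stack passes by a direct first-start scan per end index: simpler, not faster.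

-- ===== PORT A =====
-- prefix = [0]; for val in adjusted: prefix.append(prefix[-1] + val)
def pvPrefixA (values : List Int) (threshold : Int) : List Int :=
  (values.map (fun v => v - threshold)).foldl (fun p val => p ++ [p.getLast! + val]) [0]

-- the stack is represented top-first (Python append/pop at the END ↔ cons/head here);
-- 'for i, val in enumerate(prefix)' is the fold over the index range with val = P.getD i 0
-- (indices are always in range, so getD is exact).
def pvBuildF (P : List Int) (stack : List Nat) (i : Nat) : List Nat :=
  match stack with
  | [] => [i]
  | top :: _ => if P.getD i 0 < P.getD top 0 then i :: stack else stack

def pvBuildStack (P : List Int) : List Nat :=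
  (List.range P.length).foldl (pvBuildF P) []

-- 'while stack and prefix[j] >= prefix[stack[-1]]: i = stack.pop(); …'
def pvPopLoop (P : List Int) (j : Nat) (stack : List Nat) (maxLen : Int)
    (bs be : Option Int) : List Nat × Int × Option Int × Option Int :=
  match stack with
  | [] => ([], maxLen, bs, be)
  | i :: rest =>
    if P.getD j 0 ≥ P.getD i 0 then
      if (j : Int) - (i : Int) > maxLen then
        pvPopLoop P j rest ((j : Int) - (i : Int)) (some (i : Int)) (some ((j : Int) - 1))
      else pvPopLoop P j rest maxLen bs be
    else (i :: rest, maxLen, bs, be)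

def pvStepA (P : List Int) (st : List Nat × Int × Option Int × Option Int) (j : Nat) :
    List Nat × Int × Option Int × Option Int :=
  pvPopLoop P j st.1 st.2.1 st.2.2.1 st.2.2.2

def get_longest_average (values : List Int) (threshold : Int) : Option (Int × Int × Int) :=
  let P := pvPrefixA values threshold
  let res := (List.range P.length).reverse.foldl (pvStepA P) (pvBuildStack P, 0, none, none)
  if res.2.1 = 0 then none
  else
    match res.2.2.1, res.2.2.2 with
    | some a, some b => some (a, b, res.2.1)
    | _, _ => none   -- unreachable: max_len ≠ 0 forces best_start/best_end set

-- ===== PORT B =====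
-- prefix built by carrying the running sum s
def pvPrefixBGo (values : List Int) (threshold : Int) (s : Int) : List Int :=
  match values with
  | [] => []
  | v :: rest => (s + (v - threshold)) :: pvPrefixBGo rest threshold (s + (v - threshold))

def pvPrefixB (values : List Int) (threshold : Int) : List Int :=
  0 :: pvPrefixBGo values threshold 0

-- 'for i in range(j + 1): if prefix[j] >= prefix[i]: …; break' — the first-match scan
def pvFirstIdx (P : List Int) (j : Nat) (i : Nat) : Option Nat :=
  if _h : i ≤ j then
    if P.getD j 0 ≥ P.getD i 0 then some i else pvFirstIdx P j (i + 1)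
  else none
termination_by j + 1 - i

def pvStepB (P : List Int) (st : Int × Option Int × Option Int) (j : Nat) :
    Int × Option Int × Option Int :=
  match pvFirstIdx P j 0 with
  | none => st
  | some i =>
    if (j : Int) - (i : Int) > st.1 then ((j : Int) - (i : Int), some (i : Int), some ((j : Int) - 1))
    else st

def get_longest_average_alt (values : List Int) (threshold : Int) : Option (Int × Int × Int) :=
  let P := pvPrefixB values threshold
  let res := (List.range P.length).reverse.foldl (pvStepB P) (0, none, none)
  if res.1 = 0 then none
  else
    match res.2.1 with
    | some a =>
      match res.2.2 with
      | some b => some (a, b, res.1)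
      | none => none
    | none => none

-- ===== PRECONDITION & SPEC =====
def Spec_get_longest_average (values : List Int) (threshold : Int) (out : Option (Int × Int × Int)) : Prop := out = get_longest_average_alt values threshold
instance (values : List Int) (threshold : Int) (out : Option (Int × Int × Int)) : Decidable (Spec_get_longest_average values threshold out) := by unfold Spec_get_longest_average; infer_instance

-- ===== CLAIM (what is proved, stated in full; the proofs are below) =====
def Claim_equal_get_longest_average : Prop := ∀ (values : List Int) (threshold : Int), Dom_get_longest_average values threshold → Spec_get_longest_average values threshold (get_longest_average values threshold)

-- ===== LEMMAS AND PROOFS =====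

-- running-sums helper used only by the proofs
def pvSums (l : List Int) (s : Int) : List Int :=
  match l with
  | [] => []
  | a :: rest => (s + a) :: pvSums rest (s + a)

lemma pvSums_foldl : ∀ (l acc : List Int) (s : Int), acc.getLast! = s →
    l.foldl (fun p val => p ++ [p.getLast! + val]) acc = acc ++ pvSums l s := by
  intro l
  induction l with
  | nil => intro acc s _; simp [pvSums]
  | cons a l ih =>
    intro acc s h
    simp only [List.foldl_cons, pvSums]
    rw [h, ih (acc ++ [s + a]) (s + a) (by simp)]
    simp

lemma pvSums_go (threshold : Int) : ∀ (l : List Int) (s : Int),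
    pvSums (l.map (fun v => v - threshold)) s = pvPrefixBGo l threshold s := by
  intro l
  induction l with
  | nil => intro s; simp [pvSums, pvPrefixBGo]
  | cons v l ih => intro s; simp only [List.map_cons, pvSums, pvPrefixBGo, ih]

lemma prefix_eq (values : List Int) (threshold : Int) :
    pvPrefixA values threshold = pvPrefixB values threshold := by
  unfold pvPrefixA pvPrefixB
  rw [pvSums_foldl _ [0] 0 (by simp), pvSums_go]
  simp

lemma prefixB_go_length (values : List Int) (threshold : Int) : ∀ s : Int,
    (pvPrefixBGo values threshold s).length = values.length := by
  induction values with
  | nil => intro s; simp [pvPrefixBGo]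
  | cons v l ih => intro s; simp [pvPrefixBGo, ih]

lemma prefixB_length (values : List Int) (threshold : Int) :
    (pvPrefixB values threshold).length = values.length + 1 := by
  simp [pvPrefixB, prefixB_go_length]

-- strict prefix minimum
def pvSmin (P : List Int) (i : Nat) : Prop := ∀ k, k < i → P.getD i 0 < P.getD k 0

lemma firstIdx_spec (P : List Int) (j : Nat) : ∀ i, i ≤ j →
    ∃ i0, pvFirstIdx P j i = some i0 ∧ i ≤ i0 ∧ i0 ≤ j ∧ P.getD i0 0 ≤ P.getD j 0 ∧
      ∀ k, i ≤ k → k < i0 → P.getD j 0 < P.getD k 0 := by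
  suffices h : ∀ f i, j + 1 - i = f → i ≤ j →
      ∃ i0, pvFirstIdx P j i = some i0 ∧ i ≤ i0 ∧ i0 ≤ j ∧ P.getD i0 0 ≤ P.getD j 0 ∧
        ∀ k, i ≤ k → k < i0 → P.getD j 0 < P.getD k 0 by
    intro i hi; exact h _ i rfl hi
  intro f
  induction f with
  | zero => intro i hf hi; omega
  | succ f ih =>
    intro i hf hi
    rw [pvFirstIdx, dif_pos hi]
    by_cases hc : P.getD j 0 ≥ P.getD i 0
    · rw [if_pos hc]
      exact ⟨i, rfl, le_refl i, hi, hc, fun k h1 h2 => by omega⟩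
    · rw [if_neg hc]
      have hij : i < j := by
        rcases Nat.lt_or_ge i j with h | h
        · exact h
        · have he : i = j := by omega
          rw [he] at hc
          exact absurd (le_refl (P.getD j 0)) hc
      obtain ⟨i0, heq, h1, h2, h3, h4⟩ := ih (i + 1) (by omega) (by omega)
      refine ⟨i0, heq, by omega, h2, h3, fun k hk1 hk2 => ?_⟩
      rcases Nat.eq_or_lt_of_le hk1 with he | hl
      · rw [← he]; exact lt_of_not_ge hc
      · exact h4 k (by omega) hk2

-- invariant of the stack-building fold
lemma build_inv (P : List Int) : ∀ m : Nat,
    ((List.range m).foldl (pvBuildF P) []).Pairwise (· > ·)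
    ∧ (∀ i, i ∈ (List.range m).foldl (pvBuildF P) [] ↔ i < m ∧ pvSmin P i)
    ∧ (∀ top, ((List.range m).foldl (pvBuildF P) []).head? = some top →
        ∀ k, k < m → P.getD top 0 ≤ P.getD k 0) := by
  intro m
  induction m with
  | zero => simp [List.range_zero]
  | succ m ih =>
    obtain ⟨hpw, hmem, hhead⟩ := ih
    rw [List.range_succ, List.foldl_append, List.foldl_cons, List.foldl_nil]
    rcases hcase : (List.range m).foldl (pvBuildF P) [] with _ | ⟨top, rest⟩
    · have hm0 : m = 0 := by
        by_contra h
        have h0 : (0 : Nat) ∈ (List.range m).foldl (pvBuildF P) [] :=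
          (hmem 0).2 ⟨Nat.pos_of_ne_zero h, fun k hk => absurd hk (Nat.not_lt_zero k)⟩
        rw [hcase] at h0; simp at h0
      subst hm0
      refine ⟨by simp [pvBuildF], ?_, ?_⟩
      · intro i
        simp only [pvBuildF, List.mem_singleton]
        constructor
        · rintro rfl; exact ⟨Nat.zero_lt_one, fun k hk => absurd hk (Nat.not_lt_zero k)⟩
        · rintro ⟨h1, _⟩; omega
      · intro t ht k hk
        simp only [pvBuildF, List.head?_cons, Option.some.injEq] at ht
        have : k = 0 := by omega
        rw [this, ← ht]
    · rw [hcase] at hpw hmem hhead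
      have htopmem : top ∈ top :: rest := List.mem_cons_self
      have htoplt : top < m := ((hmem top).1 htopmem).1
      by_cases hc : P.getD m 0 < P.getD top 0
      · simp only [pvBuildF, if_pos hc]
        have hsminm : pvSmin P m := by
          intro k hk
          exact lt_of_lt_of_le hc (hhead top rfl k hk)
        refine ⟨?_, ?_, ?_⟩
        · rw [List.pairwise_cons]
          exact ⟨fun x hx => ((hmem x).1 hx).1, hpw⟩
        · intro i
          rw [List.mem_cons, hmem i]
          constructor
          · rintro (rfl | ⟨h1, h2⟩)
            · exact ⟨Nat.lt_succ_self _, hsminm⟩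
            · exact ⟨by omega, h2⟩
          · rintro ⟨h1, h2⟩
            rcases Nat.lt_succ_iff_lt_or_eq.1 h1 with h | rfl
            · exact Or.inr ⟨h, h2⟩
            · exact Or.inl rfl
        · intro t ht k hk
          simp only [List.head?_cons, Option.some.injEq] at ht
          subst ht
          rcases Nat.lt_succ_iff_lt_or_eq.1 hk with h | rfl
          · exact le_of_lt (hsminm k h)
          · exact le_refl _
      · simp only [pvBuildF, if_neg hc]
        refine ⟨hpw, ?_, ?_⟩
        · intro i
          rw [hmem i]
          constructor
          · rintro ⟨h1, h2⟩; exact ⟨by omega, h2⟩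
          · rintro ⟨h1, h2⟩
            rcases Nat.lt_succ_iff_lt_or_eq.1 h1 with h | rfl
            · exact ⟨h, h2⟩
            · exact absurd (h2 top htoplt) hc
        · intro t ht k hk
          rcases Nat.lt_succ_iff_lt_or_eq.1 hk with h | rfl
          · exact hhead t ht k h
          · simp only [List.head?_cons, Option.some.injEq] at ht
            subst ht
            exact not_lt.1 hc
  -- (the i = m, ¬hc case above: pvSmin P m gives P m < P top, contradicting hc)

-- the candidate-update step shared by both loops
def pvUpd (j : Nat) (st : Int × Option Int × Option Int) (i : Nat) : Int × Option Int × Option Int :=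
  if (j : Int) - (i : Int) > st.1 then ((j : Int) - (i : Int), some (i : Int), some ((j : Int) - 1))
  else st

lemma popLoop_eq (P : List Int) (j : Nat) : ∀ (stack : List Nat) (m : Int) (bs be : Option Int),
    pvPopLoop P j stack m bs be =
      (stack.dropWhile (fun i => decide (P.getD i 0 ≤ P.getD j 0)),
       (stack.takeWhile (fun i => decide (P.getD i 0 ≤ P.getD j 0))).foldl (pvUpd j) (m, bs, be)) := by
  intro stack
  induction stack with
  | nil => intro m bs be; simp [pvPopLoop]
  | cons i rest ih =>
    intro m bs be
    by_cases hc : P.getD i 0 ≤ P.getD j 0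
    · have hc' : P.getD j 0 ≥ P.getD i 0 := hc
      simp only [pvPopLoop, if_pos hc', List.takeWhile_cons, List.dropWhile_cons,
        hc, decide_true, List.foldl_cons]
      by_cases h2 : (j : Int) - (i : Int) > m
      · rw [if_pos h2, ih]
        simp [pvUpd, h2]
      · rw [if_neg h2, ih]
        simp [pvUpd, h2]
    · have hc' : ¬ P.getD j 0 ≥ P.getD i 0 := fun h => hc h
      simp only [pvPopLoop, if_neg hc', List.takeWhile_cons, List.dropWhile_cons,
        hc, decide_false, List.foldl_nil]
      simp

lemma dropWhile_gt (P : List Int) (j : Nat) : ∀ l : List Nat,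
    l.Pairwise (fun a b => P.getD a 0 < P.getD b 0) →
    ∀ a ∈ l.dropWhile (fun i => decide (P.getD i 0 ≤ P.getD j 0)), P.getD j 0 < P.getD a 0 := by
  intro l
  induction l with
  | nil => intro _ a ha; simp at ha
  | cons h t ih =>
    intro hpw a ha
    rw [List.pairwise_cons] at hpw
    by_cases hc : P.getD h 0 ≤ P.getD j 0
    · rw [List.dropWhile_cons_of_pos (by simpa using hc)] at ha
      exact ih hpw.2 a ha
    · rw [List.dropWhile_cons_of_neg (by simpa using hc)] at ha
      rcases List.mem_cons.1 ha with rfl | hat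
      · exact lt_of_not_ge hc
      · exact lt_trans (lt_of_not_ge hc) (hpw.1 a hat)

lemma decomp_last {l : List Nat} (hpw : l.Pairwise (· > ·)) {i0 : Nat} (hmem : i0 ∈ l)
    (hmin : ∀ a ∈ l, i0 ≤ a) : ∃ L, l = L ++ [i0] ∧ ∀ a ∈ L, i0 < a := by
  obtain ⟨L, R, rfl⟩ := List.append_of_mem hmem
  rw [List.pairwise_append] at hpw
  have hR : R = [] := by
    rcases R with _ | ⟨y, R'⟩
    · rfl
    · exfalso
      have h1 : i0 > y := (List.pairwise_cons.1 hpw.2.1).1 y List.mem_cons_self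
      have h2 : i0 ≤ y := hmin y (by simp)
      omega
  subst hR
  exact ⟨L, rfl, fun a ha => hpw.2.2 a ha i0 List.mem_cons_self⟩

lemma foldl_upd_last (j : Nat) : ∀ (L : List Nat) (i0 : Nat) (st : Int × Option Int × Option Int),
    (∀ a ∈ L, i0 < a) → (L ++ [i0]).foldl (pvUpd j) st = pvUpd j st i0 := by
  intro L
  induction L with
  | nil => intro i0 st _; simp
  | cons a L ih =>
    intro i0 st hlt
    rw [List.cons_append, List.foldl_cons, ih i0 _ (fun b hb => hlt b (List.mem_cons_of_mem a hb))]
    have ha : i0 < a := hlt a List.mem_cons_self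
    unfold pvUpd
    split_ifs <;> first | rfl | omega

lemma foldl_upd_none (j : Nat) : ∀ (L : List Nat) (st : Int × Option Int × Option Int),
    (∀ a ∈ L, ¬((j : Int) - (a : Int) > st.1)) → L.foldl (pvUpd j) st = st := by
  intro L
  induction L with
  | nil => intro st _; rfl
  | cons a L ih =>
    intro st h
    rw [List.foldl_cons]
    have : pvUpd j st a = st := by
      unfold pvUpd; rw [if_neg (h a List.mem_cons_self)]
    rw [this]
    exact ih st (fun b hb => h b (List.mem_cons_of_mem a hb))

-- the invariant carried down the main loop: all steps ≥ jq have been processed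
def pvInv (P : List Int) (jq : Nat) (stack : List Nat) (m : Int) : Prop :=
  stack.Pairwise (· > ·)
  ∧ (∀ i ∈ stack, i < P.length ∧ pvSmin P i ∧
      ∀ j', jq ≤ j' → j' < P.length → P.getD j' 0 < P.getD i 0)
  ∧ (∀ i, i < P.length → pvSmin P i →
      (∀ j', jq ≤ j' → j' < P.length → P.getD j' 0 < P.getD i 0) → i ∈ stack)
  ∧ 0 ≤ m
  ∧ (∀ j', jq ≤ j' → j' < P.length → ∀ i0, pvFirstIdx P j' 0 = some i0 →
      (j' : Int) - (i0 : Int) ≤ m)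

lemma step_core (P : List Int) (j : Nat) (hj : j < P.length) (stack : List Nat) (m : Int)
    (bs be : Option Int) (hInv : pvInv P (j + 1) stack m) :
    (pvStepA P (stack, m, bs, be) j).2 = pvStepB P (m, bs, be) j
    ∧ pvInv P j (pvStepA P (stack, m, bs, be) j).1 (pvStepB P (m, bs, be) j).1 := by
  obtain ⟨hpw, hsound, hcomp, hm0, hM⟩ := hInv
  obtain ⟨i0, hfi, -, hi0j, hi0le, hmin0⟩ := firstIdx_spec P j 0 (Nat.zero_le j)
  have hminA : ∀ a : Nat, P.getD a 0 ≤ P.getD j 0 → i0 ≤ a := by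
    intro a ha
    by_contra h
    exact absurd ha (not_le.mpr (hmin0 a (Nat.zero_le a) (by omega)))
  have hstepB : pvStepB P (m, bs, be) j = pvUpd j (m, bs, be) i0 := by
    simp only [pvStepB, hfi, pvUpd]
  have hpairP : stack.Pairwise (fun a b => P.getD a 0 < P.getD b 0) := by
    refine List.Pairwise.imp_of_mem ?_ hpw
    intro a b ha hb hab
    exact (hsound a ha).2.1 b hab
  have hstepA : pvStepA P (stack, m, bs, be) j =
      (stack.dropWhile (fun i => decide (P.getD i 0 ≤ P.getD j 0)),
       (stack.takeWhile (fun i => decide (P.getD i 0 ≤ P.getD j 0))).foldl (pvUpd j) (m, bs, be)) :=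
    popLoop_eq P j stack m bs be
  have hTsub : ∀ a ∈ stack.takeWhile (fun i => decide (P.getD i 0 ≤ P.getD j 0)), a ∈ stack :=
    fun a ha => (List.takeWhile_sublist _).subset ha
  have hDsub : ∀ a ∈ stack.dropWhile (fun i => decide (P.getD i 0 ≤ P.getD j 0)), a ∈ stack :=
    fun a ha => (List.dropWhile_sublist _).subset ha
  have hTle : ∀ a ∈ stack.takeWhile (fun i => decide (P.getD i 0 ≤ P.getD j 0)),
      P.getD a 0 ≤ P.getD j 0 :=
    fun a ha => by simpa using List.mem_takeWhile_imp ha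
  have hDgt : ∀ a ∈ stack.dropWhile (fun i => decide (P.getD i 0 ≤ P.getD j 0)),
      P.getD j 0 < P.getD a 0 := dropWhile_gt P j stack hpairP
  have hsplit : stack.takeWhile (fun i => decide (P.getD i 0 ≤ P.getD j 0))
      ++ stack.dropWhile (fun i => decide (P.getD i 0 ≤ P.getD j 0)) = stack :=
    List.takeWhile_append_dropWhile
  have hpwD : (stack.dropWhile (fun i => decide (P.getD i 0 ≤ P.getD j 0))).Pairwise (· > ·) :=
    hpw.sublist (List.dropWhile_sublist _)
  have hsoundD : ∀ i ∈ stack.dropWhile (fun i => decide (P.getD i 0 ≤ P.getD j 0)),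
      i < P.length ∧ pvSmin P i ∧ ∀ j', j ≤ j' → j' < P.length → P.getD j' 0 < P.getD i 0 := by
    intro i hiD
    obtain ⟨h1, h2, h3⟩ := hsound i (hDsub i hiD)
    refine ⟨h1, h2, fun j' hj1 hj2 => ?_⟩
    rcases Nat.eq_or_lt_of_le hj1 with he | hl
    · rw [← he]; exact hDgt i hiD
    · exact h3 j' (by omega) hj2
  have hcompD : ∀ i, i < P.length → pvSmin P i →
      (∀ j', j ≤ j' → j' < P.length → P.getD j' 0 < P.getD i 0) →
      i ∈ stack.dropWhile (fun i => decide (P.getD i 0 ≤ P.getD j 0)) := by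
    intro i h1 h2 h3
    have hin : i ∈ stack := hcomp i h1 h2 (fun j' hj1 hj2 => h3 j' (by omega) hj2)
    have hnotT : i ∉ stack.takeWhile (fun i => decide (P.getD i 0 ≤ P.getD j 0)) := by
      intro hiT
      exact absurd (hTle i hiT) (not_le.mpr (h3 j (le_refl j) hj))
    rw [← hsplit] at hin
    rcases List.mem_append.1 hin with h | h
    · exact absurd h hnotT
    · exact h
  by_cases hmem : i0 ∈ stack
  · -- the first valid start i0 is still on the stack: it is the last element popped
    have hi0T : i0 ∈ stack.takeWhile (fun i => decide (P.getD i 0 ≤ P.getD j 0)) := by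
      rw [← hsplit] at hmem
      rcases List.mem_append.1 hmem with h | h
      · exact h
      · exact absurd hi0le (not_le.mpr (hDgt i0 h))
    have hpwT : (stack.takeWhile (fun i => decide (P.getD i 0 ≤ P.getD j 0))).Pairwise (· > ·) :=
      hpw.sublist (List.takeWhile_sublist _)
    obtain ⟨L, hTL, hLgt⟩ := decomp_last hpwT hi0T (fun a ha => hminA a (hTle a ha))
    have hfold : (stack.takeWhile (fun i => decide (P.getD i 0 ≤ P.getD j 0))).foldl
        (pvUpd j) (m, bs, be) = pvUpd j (m, bs, be) i0 := by
      rw [hTL]; exact foldl_upd_last j L i0 _ hLgt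
    have hm' : m ≤ (pvUpd j (m, bs, be) i0).1 ∧ (j : Int) - (i0 : Int) ≤ (pvUpd j (m, bs, be) i0).1
        ∧ 0 ≤ (pvUpd j (m, bs, be) i0).1 := by
      unfold pvUpd
      split_ifs with h <;> simp only [] <;> omega
    refine ⟨by rw [hstepA, hstepB]; simp only [hfold], ?_⟩
    rw [hstepA, hstepB]
    simp only [hfold]
    refine ⟨hpwD, hsoundD, hcompD, hm'.2.2, ?_⟩
    intro j' hj1 hj2 i0' hfi'
    rcases Nat.eq_or_lt_of_le hj1 with he | hl
    · rw [← he] at hfi'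
      rw [hfi] at hfi'
      have : i0' = i0 := by injection hfi' with h; omega
      rw [this, ← he]
      exact hm'.2.1
    · exact le_trans (hM j' (by omega) hj2 i0' hfi') hm'.1
  · -- i0 was already popped at an earlier (larger) step j': every candidate here is too short
    have hsm : pvSmin P i0 := fun k hk => lt_of_le_of_lt hi0le (hmin0 k (Nat.zero_le k) hk)
    have hex : ∃ j', j + 1 ≤ j' ∧ j' < P.length ∧ P.getD i0 0 ≤ P.getD j' 0 := by
      by_contra h
      refine hmem (hcomp i0 (lt_of_le_of_lt hi0j hj) hsm ?_)
      intro j' h1 h2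
      by_contra h3
      exact h ⟨j', h1, h2, not_lt.1 h3⟩
    obtain ⟨j', hj'1, hj'2, hj'3⟩ := hex
    obtain ⟨i1, hfi1, -, -, -, hmin1⟩ := firstIdx_spec P j' 0 (Nat.zero_le j')
    have hi1le : i1 ≤ i0 := by
      by_contra h
      exact absurd hj'3 (not_le.mpr (hmin1 i0 (Nat.zero_le i0) (by omega)))
    have hMb := hM j' hj'1 hj'2 i1 hfi1
    have hbound : (j : Int) - (i0 : Int) < m := by omega
    have hTlt : ∀ a ∈ stack.takeWhile (fun i => decide (P.getD i 0 ≤ P.getD j 0)),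
        ¬((j : Int) - (a : Int) > m) := by
      intro a ha
      have h1 : i0 ≤ a := hminA a (hTle a ha)
      have h2 : a ≠ i0 := fun he => hmem (he ▸ hTsub a ha)
      have h3 : i0 < a := lt_of_le_of_ne h1 (Ne.symm h2)
      omega
    have hfold : (stack.takeWhile (fun i => decide (P.getD i 0 ≤ P.getD j 0))).foldl
        (pvUpd j) (m, bs, be) = (m, bs, be) := foldl_upd_none j _ _ hTlt
    have hB : pvUpd j (m, bs, be) i0 = (m, bs, be) := by
      unfold pvUpd
      rw [if_neg (by simp only []; omega)]
    refine ⟨by rw [hstepA, hstepB]; simp only [hfold, hB], ?_⟩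
    rw [hstepA, hstepB]
    simp only [hfold, hB]
    refine ⟨hpwD, hsoundD, hcompD, hm0, ?_⟩
    intro j'' hj1 hj2 i0' hfi'
    rcases Nat.eq_or_lt_of_le hj1 with he | hl
    · rw [← he] at hfi'
      rw [hfi] at hfi'
      have : i0' = i0 := by injection hfi' with h; omega
      rw [this, ← he]
      omega
    · exact hM j'' (by omega) hj2 i0' hfi'

lemma main_loop (P : List Int) : ∀ j : Nat, j < P.length → ∀ (stack : List Nat) (m : Int)
    (bs be : Option Int), pvInv P (j + 1) stack m →
    ((List.range (j + 1)).reverse.foldl (pvStepA P) (stack, m, bs, be)).2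
      = (List.range (j + 1)).reverse.foldl (pvStepB P) (m, bs, be) := by
  intro j
  induction j with
  | zero =>
    intro hj stack m bs be hInv
    simpa using (step_core P 0 hj stack m bs be hInv).1
  | succ j ih =>
    intro hj stack m bs be hInv
    have hcons : (List.range (j + 1 + 1)).reverse = (j + 1) :: (List.range (j + 1)).reverse := by
      rw [List.range_succ, List.reverse_append]; rfl
    rw [hcons, List.foldl_cons, List.foldl_cons]
    obtain ⟨heq, hinv'⟩ := step_core P (j + 1) hj stack m bs be hInv
    have hA : pvStepA P (stack, m, bs, be) (j + 1) =
        ((pvStepA P (stack, m, bs, be) (j + 1)).1, pvStepB P (m, bs, be) (j + 1)) := by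
      rw [← heq]
    rw [hA]
    exact ih (by omega) _ _ _ _ (by
      have := hinv'
      exact this)

-- ===== VERDICT (by name: the statement is the Claim_ definition above) =====
theorem get_longest_average_spec : Claim_equal_get_longest_average := by
  intro values threshold _
  unfold Spec_get_longest_average
  simp only [get_longest_average, get_longest_average_alt, prefix_eq]
  have hlen : (pvPrefixB values threshold).length = values.length + 1 :=
    prefixB_length values threshold
  have hInv0 : pvInv (pvPrefixB values threshold) (values.length + 1)
      (pvBuildStack (pvPrefixB values threshold)) 0 := by
    obtain ⟨h1, h2, _⟩ := build_inv (pvPrefixB values threshold) (pvPrefixB values threshold).length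
    refine ⟨h1, ?_, ?_, le_refl 0, ?_⟩
    · intro i hi
      obtain ⟨hilt, hsm⟩ := (h2 i).1 hi
      exact ⟨hilt, hsm, fun j' hj1 hj2 => by omega⟩
    · intro i hi1 hi2 _
      exact (h2 i).2 ⟨hi1, hi2⟩
    · intro j' hj1 hj2; omega
  have hmain := main_loop (pvPrefixB values threshold) values.length (by omega)
    (pvBuildStack (pvPrefixB values threshold)) 0 none none hInv0
  have hkey : ((List.range (pvPrefixB values threshold).length).reverse.foldl
        (pvStepA (pvPrefixB values threshold))
        (pvBuildStack (pvPrefixB values threshold), 0, none, none)).2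
      = (List.range (pvPrefixB values threshold).length).reverse.foldl
        (pvStepB (pvPrefixB values threshold)) (0, none, none) := by
    rw [hlen]; exact hmain
  rw [hkey]
  rcases hsp : (List.range (pvPrefixB values threshold).length).reverse.foldl
      (pvStepB (pvPrefixB values threshold)) (0, none, none) with ⟨m2, bs2, be2⟩
  by_cases h0 : m2 = 0
  · simp [h0]
  · rcases bs2 with _ | a <;> rcases be2 with _ | b <;> simp [h0]
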